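-- pv_equiv track=rewrite | github.com/SudevOP1/CS-Lab-Experiments | Sem6_CV/5_hit_miss_fit/hit_or_miss.py | apply_hmt
-- ===== SOURCE A (Python) =====
-- ZERO = 0
--
-- _ONE = 1
--
-- def apply_hmt(
--     img: list[list[int]],
--     kernel: list[list[int]],
-- ) -> tuple[bool, list[list[int]] | str]:
--
--     h = len(img)
--     w = len(img[0])
--
--     kh = len(kernel)
--     kw = len(kernel[0])
--
--     pad_h = kh // 2
--     pad_w = kw // 2
--
--     output = [[0 for _ in range(w)] for _ in range(h)]
--
--     for i in range(pad_h, h - pad_h):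
--         for j in range(pad_w, w - pad_w):
--
--             match = True
--
--             for ki in range(kh):
--                 for kj in range(kw):
--                     ni = i + ki - pad_h
--                     nj = j + kj - pad_w
--
--                     k_val = kernel[ki][kj]
--                     pixel = img[ni][nj]
--
--                     if k_val == _ONE and pixel != 255:
--                         match = False
--                         break
--                     if k_val == ZERO and pixel != 0:
--                         match = False
--                         break
--
--                 if not match:
--                     break
--
--             output[i][j] = 255 if match else 0
--
--     return True, output
-- ===== SOURCE B (Python) =====
-- def apply_hmt(
--     img: list[list[int]],
--     kernel: list[list[int]],
-- ) -> tuple[bool, list[list[int]] | str]: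
--     h, w = len(img), len(img[0])
--     kh, kw = len(kernel), len(kernel[0])
--     ph, pw = kh // 2, kw // 2
--     # one scan of the kernel builds the foreground/background offset tables
--     fg = [(ki - ph, kj - pw) for ki, row in enumerate(kernel) for kj, v in enumerate(row) if v == 1]
--     bg = [(ki - ph, kj - pw) for ki, row in enumerate(kernel) for kj, v in enumerate(row) if v == 0]
--     out = [
--         [
--             255
--             if (
--                 ph <= i < h - ph
--                 and pw <= j < w - pw
--                 and all(img[i + di][j + dj] == 255 for di, dj in fg)
--                 and all(img[i + di][j + dj] == 0 for di, dj in bg)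
--             )
--             else 0
--             for j in range(w)
--         ]
--         for i in range(h)
--     ]
--     return True, out
-- ===== Notes on version B (the rewrite author's own statement) =====
-- stated objective: alternative
-- what changed: Instead of A's per-pixel rescan of the whole kernel with nested break loops, B scans the kernel once to build foreground/background offset tables and decides each pixel with two all() tests over those tables, building the output grid directly by comprehension; Pre_ excludes empty img/kernel (A raises IndexError) and ragged rows, on which A's indexing can raise or, when a break/empty interior skips the bad access, A accidentally still returns.
-- outside the precondition, e.g. on apply_hmt([[7], [0], []], [[0], [0], [1]]): A returns (True, [[0], [0], [0]]), B raises IndexError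
import Mathlib
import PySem

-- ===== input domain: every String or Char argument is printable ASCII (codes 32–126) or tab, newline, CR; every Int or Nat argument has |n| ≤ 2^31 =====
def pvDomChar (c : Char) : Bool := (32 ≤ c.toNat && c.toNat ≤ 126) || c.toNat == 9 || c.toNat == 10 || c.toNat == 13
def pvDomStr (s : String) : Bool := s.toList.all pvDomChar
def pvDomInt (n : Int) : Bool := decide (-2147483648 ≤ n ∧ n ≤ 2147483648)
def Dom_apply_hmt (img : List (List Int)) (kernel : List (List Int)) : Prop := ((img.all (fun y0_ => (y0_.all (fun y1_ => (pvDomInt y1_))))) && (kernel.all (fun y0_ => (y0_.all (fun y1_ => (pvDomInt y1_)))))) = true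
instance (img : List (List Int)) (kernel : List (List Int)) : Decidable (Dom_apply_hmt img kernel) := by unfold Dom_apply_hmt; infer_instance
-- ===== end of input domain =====

-- B replaces A's per-pixel rescan of the kernel (nested ki/kj loops with breaks) by one kernel scan
-- that builds foreground/background offset tables and an all() test per pixel (objective: alternative
-- decomposition, same asymptotic cost).

-- shared accessor: m[i][j] (total form of Python's indexing; Pre_ keeps every performed access in range)
def pvAt (m : List (List Int)) (i j : Int) : Int :=
  PySem.List.pyGetD (PySem.List.pyGetD m i []) j 0

-- ===== PORT A =====
-- inner 'for kj in range(kw)' loop with its two break-ing ifs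
def pvInnerA (img kernel : List (List Int)) (ph pw i j ki : Int) : List Int → Bool
  | [] => true
  | kj :: rest =>
    let k_val := pvAt kernel ki kj
    let pixel := pvAt img (i + ki - ph) (j + kj - pw)
    if k_val == 1 && pixel != 255 then false
    else if k_val == 0 && pixel != 0 then false
    else pvInnerA img kernel ph pw i j ki rest

-- outer 'for ki in range(kh)' loop with its 'if not match: break'
def pvOuterA (img kernel : List (List Int)) (ph pw kw i j : Int) : List Int → Bool
  | [] => true
  | ki :: rest =>
    if pvInnerA img kernel ph pw i j ki (PySem.List.pyRange 0 kw) then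
      pvOuterA img kernel ph pw kw i j rest
    else false

def apply_hmt (img : List (List Int)) (kernel : List (List Int)) : Bool × List (List Int) :=
  let h : Int := img.length
  let w : Int := (PySem.List.pyGetD img 0 []).length
  let kh : Int := kernel.length
  let kw : Int := (PySem.List.pyGetD kernel 0 []).length
  let ph := PySem.Int.floordiv kh 2
  let pw := PySem.Int.floordiv kw 2
  let output0 := (PySem.List.pyRange 0 h).map (fun _ => (PySem.List.pyRange 0 w).map (fun _ => (0 : Int)))
  let output := (PySem.List.pyRange ph (h - ph)).foldl (fun out i =>
      (PySem.List.pyRange pw (w - pw)).foldl (fun out j =>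
        let m := pvOuterA img kernel ph pw kw i j (PySem.List.pyRange 0 kh)
        PySem.List.pySetD out i (PySem.List.pySetD (PySem.List.pyGetD out i []) j (if m then 255 else 0))) out) output0
  (true, output)

-- ===== PORT B =====
-- one scan of the kernel by enumerate: offsets where kernel == v (v = 1 foreground, v = 0 background)
def pvOffsets (kernel : List (List Int)) (ph pw v : Int) : List (Int × Int) :=
  kernel.zipIdx.flatMap (fun rowki =>
    rowki.1.zipIdx.filterMap (fun vkj =>
      if vkj.1 == v then some (((rowki.2 : Nat) : Int) - ph, ((vkj.2 : Nat) : Int) - pw) else none))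

def apply_hmt_alt (img : List (List Int)) (kernel : List (List Int)) : Bool × List (List Int) :=
  let h : Int := img.length
  let w : Int := (PySem.List.pyGetD img 0 []).length
  let kh : Int := kernel.length
  let kw : Int := (PySem.List.pyGetD kernel 0 []).length
  let ph := PySem.Int.floordiv kh 2
  let pw := PySem.Int.floordiv kw 2
  let fg := pvOffsets kernel ph pw 1
  let bg := pvOffsets kernel ph pw 0
  let out := (PySem.List.pyRange 0 h).map (fun i =>
    (PySem.List.pyRange 0 w).map (fun j =>
      if decide (ph ≤ i) && decide (i < h - ph) && decide (pw ≤ j) && decide (j < w - pw)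
          && fg.all (fun d => pvAt img (i + d.1) (j + d.2) == 255)
          && bg.all (fun d => pvAt img (i + d.1) (j + d.2) == 0)
      then (255 : Int) else 0))
  (true, out)

-- ===== PRECONDITION & SPEC =====
-- Pre_ excludes empty img/kernel (A raises IndexError on len(img[0])/len(kernel[0])) and, when the
-- interior region is nonempty, img rows shorter than img[0] or kernel rows of a length other than
-- len(kernel[0]): there A's indexing can raise, or A returns only because a break or the row excess
-- skips entries that B's single kernel scan / offset reads do touch — see the cite.
def Pre_apply_hmt (img : List (List Int)) (kernel : List (List Int)) : Prop :=
  img ≠ [] ∧ kernel ≠ [] ∧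
  (2 * (kernel.length / 2) < img.length →
   2 * ((kernel.headD []).length / 2) < (img.headD []).length →
   (∀ r ∈ img, (img.headD []).length ≤ r.length) ∧
   (∀ r ∈ kernel, r.length = (kernel.headD []).length))
instance (img : List (List Int)) (kernel : List (List Int)) : Decidable (Pre_apply_hmt img kernel) := by unfold Pre_apply_hmt; infer_instance

def pvWitness_apply_hmt : List (List Int) × List (List Int) := ([[255]], [[1]])

def Spec_apply_hmt (img : List (List Int)) (kernel : List (List Int)) (out : Bool × List (List Int)) : Prop := out = apply_hmt_alt img kernel
instance (img : List (List Int)) (kernel : List (List Int)) (out : Bool × List (List Int)) : Decidable (Spec_apply_hmt img kernel out) := by unfold Spec_apply_hmt; infer_instance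

-- ===== CLAIM (what is proved, stated in full; the proofs are below) =====
def Claim_equal_apply_hmt : Prop := ∀ (img : List (List Int)) (kernel : List (List Int)), Dom_apply_hmt img kernel → Pre_apply_hmt img kernel → Spec_apply_hmt img kernel (apply_hmt img kernel)

-- ===== LEMMAS AND PROOFS =====

-- per-entry pass test of A's inner loop body
def pvPass (img kernel : List (List Int)) (ph pw i j ki kj : Int) : Bool :=
  !((pvAt kernel ki kj == 1 && pvAt img (i + ki - ph) (j + kj - pw) != 255) ||
    (pvAt kernel ki kj == 0 && pvAt img (i + ki - ph) (j + kj - pw) != 0))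

lemma pvAllAnd {α : Type} (l : List α) (p q : α → Bool) :
    l.all (fun x => p x && q x) = (l.all p && l.all q) := by
  induction l with
  | nil => rfl
  | cons a t ih =>
    simp only [List.all_cons, ih]
    cases p a <;> cases q a <;> simp

lemma pvInnerA_eq_all (img kernel : List (List Int)) (ph pw i j ki : Int) (L : List Int) :
    pvInnerA img kernel ph pw i j ki L = L.all (fun kj => pvPass img kernel ph pw i j ki kj) := by
  induction L with
  | nil => rfl
  | cons kj rest ih =>
    simp only [pvInnerA, pvPass, List.all_cons, ih]
    cases h1 : (pvAt kernel ki kj == 1 && pvAt img (i + ki - ph) (j + kj - pw) != 255) <;>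
      cases h0 : (pvAt kernel ki kj == 0 && pvAt img (i + ki - ph) (j + kj - pw) != 0) <;>
      simp [h1, h0]

lemma pvPass_split (img kernel : List (List Int)) (ph pw i j ki : Int) (L : List Int) :
    L.all (fun kj => pvPass img kernel ph pw i j ki kj) =
      ((L.filterMap (fun kj => if pvAt kernel ki kj == 1 then some (ki - ph, kj - pw) else none)).all
          (fun d => pvAt img (i + d.1) (j + d.2) == 255) &&
       (L.filterMap (fun kj => if pvAt kernel ki kj == 0 then some (ki - ph, kj - pw) else none)).all
          (fun d => pvAt img (i + d.1) (j + d.2) == 0)) := by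
  induction L with
  | nil => rfl
  | cons kj rest ih =>
    have e1 : i + (ki - ph) = i + ki - ph := by ring
    have e2 : j + (kj - pw) = j + kj - pw := by ring
    rw [List.all_cons, List.filterMap_cons, List.filterMap_cons, ih]
    cases h1 : (pvAt kernel ki kj == 1) <;> cases h0 : (pvAt kernel ki kj == 0) <;>
      simp only [pvPass, h1, h0, if_true, if_false, Bool.false_eq_true, List.all_cons, e1, e2,
        Bool.false_and, Bool.true_and, Bool.and_false, Bool.and_true, Bool.false_or,
        Bool.or_false, Bool.not_not, Bool.not_or, bne, Bool.not_true, Bool.not_false] <;>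
      cases hP : (pvAt img (i + ki - ph) (j + kj - pw) == 255) <;>
      cases hQ : (pvAt img (i + ki - ph) (j + kj - pw) == 0) <;>
      cases hX : ((List.filterMap (fun kj => if (pvAt kernel ki kj == 1) = true then some (ki - ph, kj - pw) else none) rest).all
          (fun d => pvAt img (i + d.1) (j + d.2) == 255)) <;>
      cases hY : ((List.filterMap (fun kj => if (pvAt kernel ki kj == 0) = true then some (ki - ph, kj - pw) else none) rest).all
          (fun d => pvAt img (i + d.1) (j + d.2) == 0)) <;>
      simp [hP, hQ, hX, hY]

lemma pvOuterA_eq_all (img kernel : List (List Int)) (ph pw kw i j : Int) (L : List Int) :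
    pvOuterA img kernel ph pw kw i j L =
      L.all (fun ki => pvInnerA img kernel ph pw i j ki (PySem.List.pyRange 0 kw)) := by
  induction L with
  | nil => rfl
  | cons ki rest ih =>
    simp only [pvOuterA, List.all_cons, ih]
    cases pvInnerA img kernel ph pw i j ki (PySem.List.pyRange 0 kw) <;> simp

-- range-based offset table (what pvOffsets computes when the kernel rows all have length kw)
def pvROffsets (kernel : List (List Int)) (kh kw ph pw v : Int) : List (Int × Int) :=
  (PySem.List.pyRange 0 kh).flatMap (fun ki =>
    (PySem.List.pyRange 0 kw).filterMap (fun kj =>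
      if pvAt kernel ki kj == v then some (ki - ph, kj - pw) else none))

-- A's match loop = the two range-based offset-table tests
lemma pvMatch_eq (img kernel : List (List Int)) (ph pw kh kw i j : Int) :
    pvOuterA img kernel ph pw kw i j (PySem.List.pyRange 0 kh) =
      ((pvROffsets kernel kh kw ph pw 1).all (fun d => pvAt img (i + d.1) (j + d.2) == 255) &&
       (pvROffsets kernel kh kw ph pw 0).all (fun d => pvAt img (i + d.1) (j + d.2) == 0)) := by
  rw [pvOuterA_eq_all]
  have hpt : ∀ ki, pvInnerA img kernel ph pw i j ki (PySem.List.pyRange 0 kw) =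
      (((PySem.List.pyRange 0 kw).filterMap (fun kj => if pvAt kernel ki kj == 1 then some (ki - ph, kj - pw) else none)).all
          (fun d => pvAt img (i + d.1) (j + d.2) == 255) &&
       ((PySem.List.pyRange 0 kw).filterMap (fun kj => if pvAt kernel ki kj == 0 then some (ki - ph, kj - pw) else none)).all
          (fun d => pvAt img (i + d.1) (j + d.2) == 0)) := fun ki =>
    (pvInnerA_eq_all img kernel ph pw i j ki _).trans (pvPass_split img kernel ph pw i j ki _)
  simp only [hpt, pvAllAnd, pvROffsets, List.all_flatMap]

-- zipIdx (Python's enumerate) as a map over the index range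
lemma pvZipIdx {α : Type} (d : α) (r : List α) : ∀ n : Nat,
    (r.zipIdx n).map (fun p => (p.1, ((p.2 : Nat) : Int))) =
      (PySem.List.pyRange (n : Int) ((n : Int) + (r.length : Int))).map
        (fun t => (PySem.List.pyGetD r (t - (n : Int)) d, t)) := by
  induction r with
  | nil => intro n; simp [PySem.List.pyRange]
  | cons a rest ih =>
    intro n
    have hcons : PySem.List.pyRange (n : Int) ((n : Int) + ((a :: rest).length : Int)) =
        (n : Int) :: PySem.List.pyRange ((n : Int) + 1) ((n : Int) + ((a :: rest).length : Int)) :=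
      PySem.List.pyRange_one_cons (by simp)
    rw [hcons]
    simp only [List.zipIdx_cons, List.map_cons]
    refine List.cons_eq_cons.mpr ⟨?_, ?_⟩
    · have h0 : ((n : Int) - (n : Int)) = ((0 : Nat) : Int) := by omega
      rw [h0, PySem.List.pyGetD_natCast]
      rfl
    · rw [ih (n + 1)]
      have hrange : ((n : Int) + 1) + (rest.length : Int) = (n : Int) + ((a :: rest).length : Int) := by
        simp; omega
      rw [show ((n + 1 : Nat) : Int) = (n : Int) + 1 by push_cast; ring, hrange]
      refine List.map_congr_left ?_
      intro t ht
      have hb := PySem.List.mem_pyRange_one.mp ht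
      have h1 : (1 : Int) ≤ t - (n : Int) := by omega
      have hgd : PySem.List.pyGetD rest (t - ((n : Int) + 1)) d =
          PySem.List.pyGetD (a :: rest) (t - (n : Int)) d := by
        rw [PySem.List.pyGetD_of_nonneg rest d (by omega),
          PySem.List.pyGetD_of_nonneg (a :: rest) d (by omega)]
        have : (t - (n : Int)).toNat = (t - ((n : Int) + 1)).toNat + 1 := by omega
        rw [this, List.getD_cons_succ]
      rw [hgd]

-- one kernel row, enumerated, = the same row scanned by index range
lemma pvRowOff (r : List Int) (c pw v : Int) :
    r.zipIdx.filterMap (fun vkj =>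
        if vkj.1 == v then some (c, ((vkj.2 : Nat) : Int) - pw) else none) =
      (PySem.List.pyRange 0 (r.length : Int)).filterMap (fun kj =>
        if PySem.List.pyGetD r kj 0 == v then some (c, kj - pw) else none) := by
  have hz := pvZipIdx (0 : Int) r 0
  have hsplit : (fun vkj : Int × Nat =>
      if vkj.1 == v then some (c, ((vkj.2 : Nat) : Int) - pw) else none) =
      (fun p : Int × Int => if p.1 == v then some (c, p.2 - pw) else none) ∘
        (fun p : Int × Nat => (p.1, ((p.2 : Nat) : Int))) := rfl
  rw [hsplit, ← List.filterMap_map, hz, List.filterMap_map]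
  simp [Function.comp]

-- the enumerate-built offset table, suffix by suffix, as a scan over absolute row indices
lemma pvOffAux (v ph pw : Int) (KW : Nat) : ∀ (ks : List (List Int)) (n : Nat),
    (∀ r ∈ ks, r.length = KW) →
    (ks.zipIdx n).flatMap (fun rowki =>
        rowki.1.zipIdx.filterMap (fun vkj =>
          if vkj.1 == v then some (((rowki.2 : Nat) : Int) - ph, ((vkj.2 : Nat) : Int) - pw) else none))
    = (PySem.List.pyRange (n : Int) ((n : Int) + (ks.length : Int))).flatMap (fun ki =>
        (PySem.List.pyRange 0 (KW : Int)).filterMap (fun kj =>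
          if PySem.List.pyGetD (PySem.List.pyGetD ks (ki - (n : Int)) []) kj 0 == v
          then some (ki - ph, kj - pw) else none)) := by
  intro ks
  induction ks with
  | nil => intro n _; simp [PySem.List.pyRange]
  | cons r rest ih =>
    intro n hrows
    have hcons : PySem.List.pyRange (n : Int) ((n : Int) + ((r :: rest).length : Int)) =
        (n : Int) :: PySem.List.pyRange ((n : Int) + 1) ((n : Int) + ((r :: rest).length : Int)) :=
      PySem.List.pyRange_one_cons (by simp)
    rw [hcons]
    simp only [List.zipIdx_cons, List.flatMap_cons]
    refine congrArg₂ List.append ?_ ?_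
    · -- head row: enumerate = index scan (pvRowOff), row length = KW
      have h0 : ((n : Int) - (n : Int)) = ((0 : Nat) : Int) := by omega
      rw [pvRowOff r ((n : Int) - ph) pw v, hrows r List.mem_cons_self, h0,
        PySem.List.pyGetD_natCast]
      rfl
    · rw [ih (n + 1) (fun x hx => hrows x (List.mem_cons_of_mem _ hx))]
      have hrange : ((n + 1 : Nat) : Int) = (n : Int) + 1 := by push_cast; ring
      have hrange2 : ((n : Int) + 1) + (rest.length : Int) = (n : Int) + ((r :: rest).length : Int) := by
        simp; omega
      rw [hrange, hrange2]
      refine List.flatMap_congr ?_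
      intro ki hki
      have hb := PySem.List.mem_pyRange_one.mp hki
      have hgd : PySem.List.pyGetD rest (ki - ((n : Int) + 1)) [] =
          PySem.List.pyGetD (r :: rest) (ki - (n : Int)) [] := by
        rw [PySem.List.pyGetD_of_nonneg rest [] (by omega),
          PySem.List.pyGetD_of_nonneg (r :: rest) [] (by omega)]
        have : (ki - (n : Int)).toNat = (ki - ((n : Int) + 1)).toNat + 1 := by omega
        rw [this, List.getD_cons_succ]
      rw [hgd]

-- the enumerate-built offset table = the range-based one, when kernel rows have length KW
lemma pvOffsets_eq (kernel : List (List Int)) (KW : Nat)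
    (hrows : ∀ r ∈ kernel, r.length = KW) (ph pw v : Int) :
    pvOffsets kernel ph pw v =
      pvROffsets kernel (kernel.length : Int) (KW : Int) ph pw v := by
  unfold pvOffsets pvROffsets
  rw [pvOffAux v ph pw KW kernel 0 hrows]
  simp only [Nat.cast_zero, zero_add, sub_zero]
  rfl

-- grid/row machinery: a fold of pySetD updates along pyRange a b, read back with pyGetD
lemma pvFoldSetLen {α : Type} (upd : Int → List α → α) (L : List Int) (r : List α) :
    (L.foldl (fun acc t => PySem.List.pySetD acc t (upd t acc)) r).length = r.length := by
  induction L generalizing r with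
  | nil => rfl
  | cons t rest ih => simp only [List.foldl_cons, ih, PySem.List.length_pySetD]

lemma pvGetSet {α : Type} (xs : List α) (a m : Int) (v d : α) (ha : 0 ≤ a) (hm : 0 ≤ m)
    (hlen : a < (xs.length : Int)) :
    PySem.List.pyGetD (PySem.List.pySetD xs a v) m d =
      if m = a then v else PySem.List.pyGetD xs m d := by
  have key := PySem.List.pyGetD_pySetD_natCast xs a.toNat m.toNat v d (by omega)
  rw [Int.toNat_of_nonneg ha, Int.toNat_of_nonneg hm] at key
  rw [key]
  by_cases h : m = a
  · rw [if_pos (by omega), if_pos h]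
  · rw [if_neg (by omega), if_neg h]

lemma pvFoldSetGet {α : Type} (g : Int → α → α) (dd : α) (b : Int) (d : α) :
    ∀ (n : Nat) (a m : Int) (r : List α), (b - a).toNat = n → 0 ≤ a → b ≤ (r.length : Int) →
      0 ≤ m → m < (r.length : Int) →
      PySem.List.pyGetD
        ((PySem.List.pyRange a b).foldl
          (fun acc t => PySem.List.pySetD acc t (g t (PySem.List.pyGetD acc t dd))) r) m d
      = if a ≤ m ∧ m < b then g m (PySem.List.pyGetD r m dd) else PySem.List.pyGetD r m d := by
  intro n
  induction n with
  | zero =>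
    intro a m r hn ha hb hm0 hm
    have hba : b ≤ a := by omega
    have : ¬ (a ≤ m ∧ m < b) := by omega
    simp [PySem.List.pyRange, show ¬ a < b by omega, this]
  | succ n ih =>
    intro a m r hn ha hb hm0 hm
    have hab : a < b := by omega
    rw [PySem.List.pyRange_one_cons hab, List.foldl_cons]
    have halen : a < (r.length : Int) := by omega
    have hlen' : (PySem.List.pySetD r a (g a (PySem.List.pyGetD r a dd))).length = r.length :=
      PySem.List.length_pySetD r a _
    rw [ih (a + 1) m _ (by omega) (by omega) (by rw [hlen']; exact hb) hm0 (by rw [hlen']; exact_mod_cast hm)]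
    by_cases hma : m = a
    · have hc1 : ¬ (a + 1 ≤ m ∧ m < b) := by omega
      have hc2 : a ≤ m ∧ m < b := by omega
      simp only [hc1, if_false, hc2, if_true]
      rw [pvGetSet r a m _ d ha hm0 halen, pvGetSet r a m _ dd ha hm0 halen]
      simp [hma]
    · have hcond : (a + 1 ≤ m ∧ m < b) ↔ (a ≤ m ∧ m < b) := by omega
      rw [pvGetSet r a m _ dd ha hm0 halen, pvGetSet r a m _ d ha hm0 halen]
      simp only [hma, if_false, hcond]

-- Python's 'output[i][j] = v' inside the j-loop, collapsed to one row update per i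
lemma pvRowCollapse (val : Int → Int) (i : Int) (hi : 0 ≤ i) (L : List Int)
    (hL : ∀ j ∈ L, 0 ≤ j) (out : List (List Int)) :
    L.foldl (fun o j => PySem.List.pySetD o i
        (PySem.List.pySetD (PySem.List.pyGetD o i []) j (val j))) out
    = PySem.List.pySetD out i
        (L.foldl (fun row j => PySem.List.pySetD row j (val j)) (PySem.List.pyGetD out i [])) := by
  induction L generalizing out with
  | nil =>
    by_cases h : i < (out.length : Int)
    · have hlt : i.toNat < out.length := by omega
      rw [PySem.List.pySetD_of_nonneg out _ hi,
        PySem.List.pyGetD_eq_getElem out [] hi (by exact_mod_cast h)]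
      exact (List.set_getElem_self hlt).symm
    · simp only [List.foldl_nil]
      rw [PySem.List.pySetD_of_nonneg out _ hi]
      exact (List.set_eq_of_length_le (by omega)).symm
  | cons j rest ih =>
    simp only [List.foldl_cons]
    by_cases h : i < (out.length : Int)
    · rw [ih (fun x hx => hL x (by simp [hx]))]
      rw [pvGetSet out i i _ [] hi hi h]
      simp only [if_pos rfl, if_true]
      rw [PySem.List.pySetD_of_nonneg _ _ hi, PySem.List.pySetD_of_nonneg out _ hi, List.set_set,
        PySem.List.pySetD_of_nonneg out _ hi]
    · -- i out of range: every pySetD at i is a no-op and pyGetD returns []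
      have hset : ∀ v, PySem.List.pySetD out i v = out := by
        intro v
        rw [PySem.List.pySetD_of_nonneg out _ hi]
        exact List.set_eq_of_length_le (by omega)
      rw [hset, ih (fun x hx => hL x (by simp [hx])), hset, hset]

-- convert pyGetD pointwise equality into list equality
lemma pvExt {α : Type} (d : α) (l1 l2 : List α) (hlen : l1.length = l2.length)
    (h : ∀ k : Nat, k < l1.length →
      PySem.List.pyGetD l1 (k : Int) d = PySem.List.pyGetD l2 (k : Int) d) : l1 = l2 := by
  apply List.ext_getElem hlen
  intro k hk1 hk2
  have := h k hk1
  rw [PySem.List.pyGetD_natCast, PySem.List.pyGetD_natCast] at this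
  rwa [List.getD_eq_getElem l1 d hk1, List.getD_eq_getElem l2 d hk2] at this

-- the whole grid equality, proved pointwise with the fold lemmas above
lemma pvGrid_eq (img kernel : List (List Int))
    (hker : 2 * (kernel.length / 2) < img.length →
      2 * ((PySem.List.pyGetD kernel 0 []).length / 2) < (PySem.List.pyGetD img 0 []).length →
      ∀ r ∈ kernel, r.length = (PySem.List.pyGetD kernel 0 []).length) :
    apply_hmt img kernel = apply_hmt_alt img kernel := by
  simp only [apply_hmt, apply_hmt_alt]
  have hph : PySem.Int.floordiv ((kernel.length : Nat) : Int) 2 = (((kernel.length / 2 : Nat)) : Int) := by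
    exact_mod_cast PySem.Int.floordiv_natCast kernel.length 2
  have hpw : PySem.Int.floordiv (((PySem.List.pyGetD kernel 0 []).length : Nat) : Int) 2
      = (((PySem.List.pyGetD kernel 0 []).length / 2 : Nat) : Int) := by
    exact_mod_cast PySem.Int.floordiv_natCast (PySem.List.pyGetD kernel 0 []).length 2
  rw [hph, hpw, Prod.mk.injEq]
  refine ⟨rfl, ?_⟩
  set H : Nat := img.length with hH
  set W : Nat := (PySem.List.pyGetD img 0 []).length with hW
  set KH : Nat := kernel.length with hKH
  set KW : Nat := (PySem.List.pyGetD kernel 0 []).length with hKW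
  set PH : Nat := KH / 2 with hPH
  set PW : Nat := KW / 2 with hPW
  set val : Int → Int → Int := fun i j =>
    if pvOuterA img kernel (PH : Int) (PW : Int) (KW : Int) i j (PySem.List.pyRange 0 (KH : Int))
    then (255 : Int) else 0 with hval
  set zrow : List Int := (PySem.List.pyRange 0 (W : Int)).map (fun _ => (0 : Int)) with hzrow
  set Z : List (List Int) := (PySem.List.pyRange 0 (H : Int)).map (fun _ => zrow) with hZ
  have hZlen : Z.length = H := by rw [hZ, PySem.List.pyRange_zero_natCast]; simp
  have hzrowlen : zrow.length = W := by rw [hzrow, PySem.List.pyRange_zero_natCast]; simp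
  -- collapse the per-pixel grid updates of A into one row update per i
  have hcollapse :
      (PySem.List.pyRange (PH : Int) ((H : Int) - (PH : Int))).foldl (fun out i =>
        (PySem.List.pyRange (PW : Int) ((W : Int) - (PW : Int))).foldl (fun out j =>
          PySem.List.pySetD out i
            (PySem.List.pySetD (PySem.List.pyGetD out i []) j (val i j))) out) Z
      = (PySem.List.pyRange (PH : Int) ((H : Int) - (PH : Int))).foldl (fun out i =>
          PySem.List.pySetD out i
            ((PySem.List.pyRange (PW : Int) ((W : Int) - (PW : Int))).foldl
              (fun row j => PySem.List.pySetD row j (val i j))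
              (PySem.List.pyGetD out i []))) Z := by
    refine PySem.List.foldl_congr_mem _ _ _ _ ?_
    intro acc i hi
    have hi0 : (0 : Int) ≤ i := by
      have := (PySem.List.mem_pyRange_one.mp hi).1
      omega
    exact pvRowCollapse (val i) i hi0 _
      (fun j hj => by have := (PySem.List.mem_pyRange_one.mp hj).1; omega) acc
  rw [hcollapse]
  refine pvExt ([] : List Int) _ _ ?_ ?_
  · rw [pvFoldSetLen (fun t acc =>
      (PySem.List.pyRange (PW : Int) ((W : Int) - (PW : Int))).foldl
        (fun row j => PySem.List.pySetD row j (val t j)) (PySem.List.pyGetD acc t []))]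
    rw [hZlen, PySem.List.pyRange_zero_natCast]; simp
  · intro k hk
    rw [pvFoldSetLen (fun t acc =>
      (PySem.List.pyRange (PW : Int) ((W : Int) - (PW : Int))).foldl
        (fun row j => PySem.List.pySetD row j (val t j)) (PySem.List.pyGetD acc t [])), hZlen] at hk
    rw [pvFoldSetGet (fun t r =>
        (PySem.List.pyRange (PW : Int) ((W : Int) - (PW : Int))).foldl
          (fun row j => PySem.List.pySetD row j (val t j)) r) ([] : List Int)
        ((H : Int) - (PH : Int)) ([] : List Int)
        (((H : Int) - (PH : Int) - (PH : Int)).toNat) (PH : Int) (k : Int) Z rfl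
        (by omega) (by rw [hZlen]; omega) (by omega) (by rw [hZlen]; exact_mod_cast hk)]
    rw [PySem.List.pyGetD_map_pyRange (fun _ => zrow) H k [] hk]
    rw [PySem.List.pyGetD_map_pyRange _ H k [] hk]
    by_cases ho : (PH : Int) ≤ (k : Int) ∧ (k : Int) < (H : Int) - (PH : Int)
    · rw [if_pos ho]
      refine pvExt (0 : Int) _ _ ?_ ?_
      · rw [pvFoldSetLen (fun t _ => val (k : Int) t), hzrowlen, PySem.List.pyRange_zero_natCast]
        simp
      · intro k2 hk2
        rw [pvFoldSetLen (fun t _ => val (k : Int) t), hzrowlen] at hk2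
        rw [pvFoldSetGet (fun t _ => val (k : Int) t) (0 : Int)
            ((W : Int) - (PW : Int)) (0 : Int)
            (((W : Int) - (PW : Int) - (PW : Int)).toNat) (PW : Int) (k2 : Int) zrow rfl
            (by omega) (by rw [hzrowlen]; omega) (by omega) (by rw [hzrowlen]; exact_mod_cast hk2)]
        rw [PySem.List.pyGetD_map_pyRange (fun _ => (0 : Int)) W k2 (0 : Int) hk2]
        rw [PySem.List.pyGetD_map_pyRange _ W k2 (0 : Int) hk2]
        rw [hval]
        simp only [pvMatch_eq img kernel (PH : Int) (PW : Int) (KH : Int) (KW : Int) (k : Int) (k2 : Int)]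
        by_cases hj : (PW : Int) ≤ (k2 : Int) ∧ (k2 : Int) < (W : Int) - (PW : Int)
        · have hrows : ∀ r ∈ kernel, r.length = KW :=
            hker (by omega) (by omega)
          rw [pvOffsets_eq kernel KW hrows (PH : Int) (PW : Int) 1,
            pvOffsets_eq kernel KW hrows (PH : Int) (PW : Int) 0]
          rw [if_pos hj]
          simp only [Bool.and_eq_true, decide_eq_true_eq]
          refine if_congr ?_ rfl rfl
          constructor
          · rintro ⟨h1, h2⟩
            exact ⟨⟨⟨⟨⟨ho.1, ho.2⟩, hj.1⟩, hj.2⟩, h1⟩, h2⟩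
          · rintro ⟨⟨⟨⟨⟨-, -⟩, -⟩, -⟩, h1⟩, h2⟩
            exact ⟨h1, h2⟩
        · rw [if_neg hj]
          rw [if_neg]
          simp only [Bool.and_eq_true, decide_eq_true_eq]
          rintro ⟨⟨⟨⟨⟨-, -⟩, hc⟩, hd⟩, -⟩, -⟩
          exact hj ⟨hc, hd⟩
    · rw [if_neg ho]
      refine pvExt (0 : Int) _ _ ?_ ?_
      · rw [hzrowlen, PySem.List.pyRange_zero_natCast]; simp
      · intro k2 hk2
        rw [hzrowlen] at hk2
        rw [PySem.List.pyGetD_map_pyRange (fun _ => (0 : Int)) W k2 (0 : Int) hk2]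
        rw [PySem.List.pyGetD_map_pyRange _ W k2 (0 : Int) hk2]
        rw [if_neg]
        simp only [Bool.and_eq_true, decide_eq_true_eq]
        rintro ⟨⟨⟨⟨⟨ha, hb⟩, -⟩, -⟩, -⟩, -⟩
        exact ho ⟨ha, hb⟩

-- ===== VERDICT (by name: the statement is the Claim_ definition above) =====
theorem apply_hmt_spec : Claim_equal_apply_hmt := by
  intro img kernel _ hpre
  have hhead : ∀ (l : List (List Int)), PySem.List.pyGetD l (0 : Int) [] = l.headD [] := by
    intro l
    rw [show (0 : Int) = ((0 : Nat) : Int) from rfl, PySem.List.pyGetD_natCast]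
    cases l <;> simp
  refine pvGrid_eq img kernel ?_
  rw [hhead kernel, hhead img]
  intro h1 h2
  exact (hpre.2.2 h1 h2).2
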